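-- pv_equiv track=rewrite | github.com/prcmandl/sca_tool_evaluation | src/ground_truth_generation/build_dual_osv_dataset.py | ensure_balanced
-- ===== SOURCE A (Python) =====
-- from typing import Dict, List, Set, Tuple
--
-- def normalize_eco(eco: str) -> str:
--     return eco.strip().lower()
--
-- def ensure_balanced(
--     items: List[Tuple[str, str, str]],
--     target_total: int,
--     quotas: Dict[str, int],
-- ) -> List[Tuple[str, str, str]]:
--
--     buckets: Dict[str, List[Tuple[str, str, str]]] = {}
--
--     for eco, name, ver in items:
--         eco = normalize_eco(eco)
--         buckets.setdefault(eco, []).append((eco, name, ver))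
--
--     out: List[Tuple[str, str, str]] = []
--     missing: Dict[str, int] = {}
--
--     for eco, quota in quotas.items():
--         have = len(buckets.get(eco, []))
--         if have < quota:
--             missing[eco] = quota - have
--         out.extend(buckets.get(eco, [])[:quota])
--
--     if len(out) != target_total:
--         raise RuntimeError(
--             f"Could not satisfy balanced selection: got {len(out)} expected {target_total}. "
--             f"Missing per ecosystem: {missing}. "
--             f"Bucket sizes: { {k: len(v) for k, v in buckets.items()} }"
--         )
--
--     return out
-- ===== SOURCE B (Python) =====
-- def normalize_eco(eco: str) -> str:
--     return eco.strip().lower()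
--
-- def ensure_balanced(items, target_total, quotas):
--     normed = [(normalize_eco(e), n, v) for e, n, v in items]
--     out = []
--     for eco, quota in quotas.items():
--         out += [t for t in normed if t[0] == eco][:quota]
--     if len(out) != target_total:
--         raise RuntimeError(
--             f"Could not satisfy balanced selection: got {len(out)} expected {target_total}."
--         )
--     return out
-- ===== Notes on version B (the rewrite author's own statement) =====
-- stated objective: alternative
-- what changed: B drops A's bucket-dict grouping (setdefault/append then per-quota dict lookup and slice) and instead normalizes items once, then for each quota filters the normalized list directly and slices it; no dict and no missing/bucket-size bookkeeping is kept.
import Mathlib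
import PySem

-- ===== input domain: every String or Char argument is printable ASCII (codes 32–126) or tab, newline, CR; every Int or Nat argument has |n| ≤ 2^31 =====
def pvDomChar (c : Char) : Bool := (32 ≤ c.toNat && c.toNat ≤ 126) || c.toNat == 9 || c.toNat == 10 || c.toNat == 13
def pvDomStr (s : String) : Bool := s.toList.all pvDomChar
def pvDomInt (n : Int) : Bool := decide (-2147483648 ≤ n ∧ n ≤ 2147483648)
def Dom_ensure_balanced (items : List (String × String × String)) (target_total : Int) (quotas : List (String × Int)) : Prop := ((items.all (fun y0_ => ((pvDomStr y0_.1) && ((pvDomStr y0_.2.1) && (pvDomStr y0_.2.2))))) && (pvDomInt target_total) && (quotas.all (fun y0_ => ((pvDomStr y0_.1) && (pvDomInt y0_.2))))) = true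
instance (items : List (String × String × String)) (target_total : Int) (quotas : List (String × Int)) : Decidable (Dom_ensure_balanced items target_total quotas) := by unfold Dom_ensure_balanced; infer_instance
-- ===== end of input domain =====

-- B replaces A's bucket-dict grouping with a normalize-once-then-filter-per-quota pass (alternative decomposition,
-- not claimed faster); on inputs where the selected total misses target_total the Python raises RuntimeError —
-- those inputs are excluded by Pre_ and both ports return [] there.

-- ===== PORT A =====
-- normalize_eco(eco) = eco.strip().lower()
def normalize_eco (eco : String) : String := PySem.Str.lower (PySem.Str.strip eco)

def ensure_balanced (items : List (String × String × String)) (target_total : Int) (quotas : List (String × Int)) : List (String × String × String) :=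
  -- buckets.setdefault(eco, []).append((eco, name, ver)) over items, eco normalized
  let buckets : PySem.Dict String (List (String × String × String)) :=
    items.foldl (fun d it =>
      let eco := normalize_eco it.1
      d.modify eco [] (· ++ [(eco, it.2.1, it.2.2)])) PySem.Dict.empty
  -- for eco, quota in quotas.items(): track (out, missing)
  let st : List (String × String × String) × PySem.Dict String Int :=
    quotas.foldl (fun s p =>
      let b := buckets.getD p.1 []
      let haveN : Int := (b.length : Int)
      let missing := if haveN < p.2 then s.2.insert p.1 (p.2 - haveN) else s.2
      (s.1 ++ PySem.List.slice b none (some p.2), missing)) ([], PySem.Dict.empty)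
  -- raise RuntimeError(...) becomes [] (excluded by Pre_)
  if (st.1.length : Int) = target_total then st.1 else []

-- ===== PORT B =====
def ensure_balanced_alt (items : List (String × String × String)) (target_total : Int) (quotas : List (String × Int)) : List (String × String × String) :=
  let normed := items.map (fun it => (normalize_eco it.1, it.2.1, it.2.2))
  let out := quotas.foldl (fun acc p =>
    acc ++ PySem.List.slice (normed.filter (fun t => t.1 == p.1)) none (some p.2)) []
  -- raise RuntimeError(...) becomes [] (excluded by Pre_)
  if (out.length : Int) = target_total then out else []

-- ===== PRECONDITION & SPEC =====
-- Length of the Python slice xs[:q] when xs has c elements.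
def pvSliceLen (c q : Int) : Int := if q < 0 then max (c + q) 0 else min q c

-- Pre_ excludes exactly the inputs on which A raises RuntimeError: the per-quota slice lengths must sum to target_total.
def Pre_ensure_balanced (items : List (String × String × String)) (target_total : Int) (quotas : List (String × Int)) : Prop :=
  quotas.foldl (fun acc p =>
    acc + pvSliceLen ((items.countP (fun it => normalize_eco it.1 == p.1)) : Int) p.2) 0 = target_total
instance (items : List (String × String × String)) (target_total : Int) (quotas : List (String × Int)) : Decidable (Pre_ensure_balanced items target_total quotas) := by unfold Pre_ensure_balanced; infer_instance

def pvWitness_ensure_balanced : (List (String × String × String)) × Int × (List (String × Int)) :=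
  ([("PyPI", "a", "1"), (" npm ", "b", "2"), ("pypi", "c", "3")], 3, [("pypi", 2), ("npm", 1), ("go", 0)])

def Spec_ensure_balanced (items : List (String × String × String)) (target_total : Int) (quotas : List (String × Int)) (out : List (String × String × String)) : Prop := out = ensure_balanced_alt items target_total quotas
instance (items : List (String × String × String)) (target_total : Int) (quotas : List (String × Int)) (out : List (String × String × String)) : Decidable (Spec_ensure_balanced items target_total quotas out) := by unfold Spec_ensure_balanced; infer_instance

-- ===== CLAIM (what is proved, stated in full; the proofs are below) =====
def Claim_equal_ensure_balanced : Prop := ∀ (items : List (String × String × String)) (target_total : Int) (quotas : List (String × Int)), Dom_ensure_balanced items target_total quotas → Pre_ensure_balanced items target_total quotas → Spec_ensure_balanced items target_total quotas (ensure_balanced items target_total quotas)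

-- ===== LEMMAS AND PROOFS =====

-- A's bucket for key e is exactly B's filter of the normalized items.
lemma buckets_getD_eq (items : List (String × String × String)) (e : String) :
    (items.foldl (fun d it =>
      let eco := normalize_eco it.1
      d.modify eco [] (· ++ [(eco, it.2.1, it.2.2)])) PySem.Dict.empty).getD e []
    = (items.map (fun it => (normalize_eco it.1, it.2.1, it.2.2))).filter (fun t => t.1 == e) := by
  have h := PySem.Dict.getD_foldl_modify_append
    (l := items.map (fun it => (normalize_eco it.1, (normalize_eco it.1, it.2.1, it.2.2))))
    (d := (PySem.Dict.empty : PySem.Dict String (List (String × String × String)))) (c := e)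
  rw [List.foldl_map] at h
  simp only [PySem.Dict.getD_empty, List.nil_append] at h
  rw [h, List.filter_map, List.map_map, List.filter_map]
  rfl

-- The fst of A's (out, missing) fold is the plain out-accumulating fold over the same buckets.
lemma fold_fst_eq (buckets : PySem.Dict String (List (String × String × String))) :
    ∀ (quotas : List (String × Int)) (out : List (String × String × String)) (m : PySem.Dict String Int),
    (quotas.foldl (fun s p =>
      let b := buckets.getD p.1 []
      let haveN : Int := (b.length : Int)
      let missing := if haveN < p.2 then s.2.insert p.1 (p.2 - haveN) else s.2
      (s.1 ++ PySem.List.slice b none (some p.2), missing)) (out, m)).1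
    = quotas.foldl (fun acc p =>
        acc ++ PySem.List.slice (buckets.getD p.1 []) none (some p.2)) out := by
  intro quotas
  induction quotas with
  | nil => intro out m; rfl
  | cons p qs ih =>
    intro out m
    simp only [List.foldl_cons]
    exact ih _ _

lemma ports_eq (items : List (String × String × String)) (target_total : Int) (quotas : List (String × Int)) :
    ensure_balanced items target_total quotas = ensure_balanced_alt items target_total quotas := by
  unfold ensure_balanced ensure_balanced_alt
  dsimp only
  rw [fold_fst_eq]
  have hfun : (fun (acc : List (String × String × String)) (p : String × Int) =>
      acc ++ PySem.List.slice ((items.foldl (fun d it =>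
        let eco := normalize_eco it.1
        d.modify eco [] (· ++ [(eco, it.2.1, it.2.2)])) PySem.Dict.empty).getD p.1 []) none (some p.2))
    = (fun (acc : List (String × String × String)) (p : String × Int) =>
      acc ++ PySem.List.slice (((items.map (fun it => (normalize_eco it.1, it.2.1, it.2.2))).filter
        (fun t => t.1 == p.1))) none (some p.2)) := by
    funext acc p
    rw [buckets_getD_eq]
  rw [hfun]

-- ===== VERDICT (by name: the statement is the Claim_ definition above) =====
theorem ensure_balanced_spec : Claim_equal_ensure_balanced := by
  intro items target_total quotas _ _
  exact ports_eq items target_total quotas
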